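-- pv_equiv track=rewrite | github.com/RGBsec/CTFs2020 | RACTF2020/solve_06.py | alphabet_and_key
-- ===== SOURCE A (Python) =====
-- from string import ascii_uppercase, digits
--
-- def alphabet_and_key(primer: list, key: str, plaintext: str) -> tuple:
--     # assert primer.isdecimal() and len(primer) == 5, primer
--     # assert len(key) <= 26 and len(key) == len(set(key)) and key.isalpha(), key
--     # assert plaintext.isalpha(), plaintext
--     N = len(primer)
--     # key = key.upper()
--     key_chars = set(key)
--     t_rows = (26 + len(key) - 1) // len(key)
--     table = ['' for _ in range(t_rows)]
--     table[0] = key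
--     c = 0
--     for i in range(1, t_rows):
--         col = 0
--         while col < len(key):
--             if c >= 26:
--                 break
--             if ascii_uppercase[c] not in key_chars:
--                 table[i] += ascii_uppercase[c]
--                 col += 1
--             c += 1
--     order = [sorted(key).index(c) for c in key]
--     col_order = [order[n] for n in order]
--     ct_alphabet = []
--     for col in col_order:
--         for row in table:
--             if col < len(row):
--                 ct_alphabet.append(row[col])
--     # assert len(ct_alphabet) == 26, ct_alphabet
--     # assert ct_alphabet.isupper(), ct_alphabet
--     full_key = [int(n) for n in primer]
--     for i in range(N, len(plaintext)):
--         full_key.append((int(full_key[i - N]) + int(full_key[i - N + 1])) % 10)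
--     return ct_alphabet, full_key
-- ===== SOURCE B (Python) =====
-- from string import ascii_uppercase
--
-- def alphabet_and_key(primer: list, key: str, plaintext: str) -> tuple:
--     L = len(key)
--     t_rows = (26 + L - 1) // L
--     keyset = set(key)
--     # leftover letters in order, truncated to what the table can hold
--     remaining = [c for c in ascii_uppercase if c not in keyset][:(t_rows - 1) * L]
--     ranks = {}
--     for r, c in enumerate(sorted(key)):
--         if c not in ranks:
--             ranks[c] = r
--     order = [ranks[c] for c in key]
--     ct_alphabet = []
--     for col in (order[n] for n in order):
--         ct_alphabet.append(key[col])
--         ct_alphabet.extend(remaining[col::L])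
--     full_key = [int(n) for n in primer]
--     window = list(full_key)
--     for _ in range(len(plaintext) - len(primer)):
--         nxt = (window[0] + window[1]) % 10
--         window = window[1:] + [nxt]
--         full_key.append(nxt)
--     return ct_alphabet, full_key
-- ===== Notes on version B (the rewrite author's own statement) =====
-- stated objective: alternative
-- what changed: B drops A's table entirely: it filters the leftover letters once and reads each ciphertext column as the slice remaining[col::len(key)] (instead of A's char-by-char skip/break row-filling loop followed by a row scan per column), computes ranks with a first-occurrence dict built from enumerate(sorted(key)) instead of repeated sorted(key).index scans, and generates the lagged-Fibonacci keystream with a sliding window instead of indexing back into the growing list.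
import Mathlib
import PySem

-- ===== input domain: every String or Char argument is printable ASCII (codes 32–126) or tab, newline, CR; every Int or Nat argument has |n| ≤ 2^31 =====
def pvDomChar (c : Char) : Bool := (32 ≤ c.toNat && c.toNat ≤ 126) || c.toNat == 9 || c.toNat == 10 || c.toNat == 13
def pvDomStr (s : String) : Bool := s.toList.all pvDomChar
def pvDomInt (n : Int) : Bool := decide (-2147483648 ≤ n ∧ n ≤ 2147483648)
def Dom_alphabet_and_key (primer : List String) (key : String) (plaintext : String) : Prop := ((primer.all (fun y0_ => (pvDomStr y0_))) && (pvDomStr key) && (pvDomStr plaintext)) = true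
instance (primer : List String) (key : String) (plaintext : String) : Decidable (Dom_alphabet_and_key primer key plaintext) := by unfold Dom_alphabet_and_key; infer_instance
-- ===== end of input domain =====

-- B re-implements the table as filter-then-slice (no table, no char-skipping while loop), ranks via a
-- first-occurrence dict, and the lagged-Fibonacci loop as a sliding-window generator; return value only.

-- ===== PORT A =====
-- string.ascii_uppercase
def pvAsciiUpper : List Char := "ABCDEFGHIJKLMNOPQRSTUVWXYZ".toList

-- A's inner 'while col < len(key)' loop filling one table row (breaks when c reaches 26);
-- Python strings are handled as their code-point lists (exact per PySem convention).
def pvFillRow (ks : PySem.Set Char) (L : Nat) (c col : Nat) (row : List Char) : List Char × Nat :=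
  if _h : col < L ∧ c < 26 then
    -- ascii_uppercase[c]: c < 26 guaranteed by the guard, so getD is exact
    if PySem.Set.contains ks (pvAsciiUpper.getD c ' ') then
      pvFillRow ks L (c+1) col row
    else
      pvFillRow ks L (c+1) (col+1) (row ++ [pvAsciiUpper.getD c ' '])
  else (row, c)
termination_by 26 - c
decreasing_by all_goals omega

def alphabet_and_key (primer : List String) (key : String) (plaintext : String) : List String × List Int :=
  let kl := key.toList
  let N := primer.length
  let key_chars := PySem.Set.ofList kl
  -- (26 + len(key) - 1) // len(key): both operands nonnegative, Nat division is exact (len(key) = 0 raises in Python: excluded by Pre_)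
  let t_rows := (26 + kl.length - 1) / kl.length
  -- for i in range(1, t_rows): fill table[i] threading c; table[0] = key
  let st := (List.range (t_rows - 1)).foldl
      (fun (st : List (List Char) × Nat) _ =>
        (st.1 ++ [(pvFillRow key_chars kl.length st.2 0 []).1], (pvFillRow key_chars kl.length st.2 0 []).2)) ([], 0)
  let table := kl :: st.1
  -- order = [sorted(key).index(c) for c in key]; c ∈ key so .index always succeeds (getD 0 unreachable)
  let order := kl.map (fun ch => ((PySem.List.index? (PySem.List.sorted kl (fun x => x)) ch).getD 0))
  -- col_order = [order[n] for n in order]; every rank n < len(order) so getD 0 is exact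
  let col_order := order.map (fun n => order.getD n 0)
  let ct := col_order.foldl
      (fun acc col => table.foldl
        (fun acc2 row => if col < row.length then acc2 ++ [String.singleton (row.getD col ' ')] else acc2) acc) []
  -- full_key = [int(n) for n in primer]; Pre_ guarantees every int() succeeds, so getD 0 is exact
  let fk0 := primer.map (fun s => (PySem.Int.ofStr? s).getD 0)
  -- for i in range(N, len(plaintext)): append (full_key[i-N] + full_key[i-N+1]) % 10
  -- (range(N, M) = List.range' N (M - N) over Nats; indices i-N, i-N+1 are in range under Pre_, so getD is exact)
  let fk := (List.range' N (plaintext.toList.length - N)).foldl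
      (fun fk i => fk ++ [PySem.Int.mod (fk.getD (i - N) 0 + fk.getD (i - N + 1) 0) 10]) fk0
  (ct, fk)

-- ===== PORT B =====
-- the sliding-window generator of Source B: emit (w[0]+w[1]) % 10 and slide the window
def pvWindowGen : Nat → List Int → List Int
  | 0, _ => []
  | k+1, w =>
    let nxt := PySem.Int.mod (w.getD 0 0 + w.getD 1 0) 10
    nxt :: pvWindowGen k (w.drop 1 ++ [nxt])

def alphabet_and_key_alt (primer : List String) (key : String) (plaintext : String) : List String × List Int :=
  let kl := key.toList
  let L := kl.length
  let t_rows := (26 + L - 1) / L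
  let ks := PySem.Set.ofList kl
  -- remaining = [c for c in ascii_uppercase if c not in keyset][:(t_rows-1)*L]
  let remaining := (pvAsciiUpper.filter (fun c => !(PySem.Set.contains ks c))).take ((t_rows - 1) * L)
  -- ranks: first-occurrence rank dict over enumerate(sorted(key))
  let ranks := (PySem.List.enumerate (PySem.List.sorted kl (fun x => x))).foldl
      (fun (d : PySem.Dict Char Int) rc => if (d.get? rc.2).isSome then d else d.insert rc.2 rc.1)
      PySem.Dict.empty
  -- order = [ranks[c] for c in key]; c is always a key of ranks, so getD 0 is exact
  let order := kl.map (fun c => (ranks.get? c).getD 0)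
  -- for col in (order[n] for n in order): append key[col]; extend remaining[col::L]
  let ct := order.foldl
      (fun acc n =>
        let col := (PySem.List.pyGet? order n).getD 0
        acc ++ String.singleton ((PySem.List.pyGet? kl col).getD ' ')
           :: ((PySem.List.slice? remaining (some col) none (L : Int)).getD []).map String.singleton) []
  -- full_key = [int(n) for n in primer]; then the sliding-window loop (int() succeeds under Pre_)
  let fk0 := primer.map (fun s => (PySem.Int.ofStr? s).getD 0)
  (ct, fk0 ++ pvWindowGen (plaintext.toList.length - primer.length) fk0)

-- ===== PRECONDITION & SPEC =====
-- Pre_ excludes exactly the inputs where A raises: empty key (ZeroDivisionError), a primer entry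
-- int() rejects (ValueError), and primer of length < 2 with a strictly longer plaintext (IndexError).
def Pre_alphabet_and_key (primer : List String) (key : String) (plaintext : String) : Prop :=
  key.toList ≠ [] ∧ (∀ s ∈ primer, (PySem.Int.ofStr? s).isSome) ∧
    (2 ≤ primer.length ∨ plaintext.toList.length ≤ primer.length)
instance (primer : List String) (key : String) (plaintext : String) : Decidable (Pre_alphabet_and_key primer key plaintext) := by unfold Pre_alphabet_and_key; infer_instance

def pvWitness_alphabet_and_key : List String × String × String := (["3", "1"], "KEY", "ABCD")

def Spec_alphabet_and_key (primer : List String) (key : String) (plaintext : String) (out : List String × List Int) : Prop := out = alphabet_and_key_alt primer key plaintext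
instance (primer : List String) (key : String) (plaintext : String) (out : List String × List Int) : Decidable (Spec_alphabet_and_key primer key plaintext out) := by unfold Spec_alphabet_and_key; infer_instance

-- ===== CLAIM (what is proved, stated in full; the proofs are below) =====
def Claim_equal_alphabet_and_key : Prop := ∀ (primer : List String) (key : String) (plaintext : String), Dom_alphabet_and_key primer key plaintext → Pre_alphabet_and_key primer key plaintext → Spec_alphabet_and_key primer key plaintext (alphabet_and_key primer key plaintext)


-- ===== LEMMAS AND PROOFS =====

-- the not-yet-consumed leftover letters: ascii_uppercase from position c, with key letters removed
def pvRemFrom (ks : PySem.Set Char) (c : Nat) : List Char :=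
  (pvAsciiUpper.drop c).filter (fun ch => !(PySem.Set.contains ks ch))

theorem pvUpperLen : pvAsciiUpper.length = 26 := by decide

-- A's row-filling loop consumes exactly the next (L - col) leftover letters
theorem pvFillRow_spec (ks : PySem.Set Char) (L : Nat) : ∀ (n c : Nat), 26 ≤ c + n → ∀ (col : Nat) (acc : List Char),
    ∃ c', pvFillRow ks L c col acc = (acc ++ (pvRemFrom ks c).take (L - col), c') ∧
          pvRemFrom ks c' = (pvRemFrom ks c).drop (L - col) := by
  intro n
  induction n with
  | zero =>
    intro c hc col acc
    have hrem : pvRemFrom ks c = [] := by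
      unfold pvRemFrom
      rw [List.drop_eq_nil_of_le (by rw [pvUpperLen]; omega)]
      rfl
    refine ⟨c, ?_, ?_⟩
    · rw [pvFillRow, dif_neg (by omega), hrem]
      simp
    · rw [hrem]; simp
  | succ n ih =>
    intro c hc col acc
    by_cases hg : col < L ∧ c < 26
    · have hlt : c < pvAsciiUpper.length := by rw [pvUpperLen]; omega
      have hdropc : pvAsciiUpper.drop c = pvAsciiUpper[c] :: pvAsciiUpper.drop (c+1) :=
        List.drop_eq_getElem_cons hlt
      have hgetD : pvAsciiUpper.getD c ' ' = pvAsciiUpper[c] := List.getD_eq_getElem _ _ hlt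
      rw [pvFillRow, dif_pos hg]
      by_cases hks : PySem.Set.contains ks (pvAsciiUpper.getD c ' ')
      · rw [if_pos hks]
        have hrem : pvRemFrom ks c = pvRemFrom ks (c+1) := by
          unfold pvRemFrom
          rw [hdropc, List.filter_cons_of_neg (by rw [← hgetD]; simp only [hks, Bool.not_true, Bool.false_eq_true, not_false_eq_true])]
        obtain ⟨c', h1, h2⟩ := ih (c+1) (by omega) col acc
        exact ⟨c', by rw [h1, hrem], by rw [h2, hrem]⟩
      · rw [if_neg hks]
        have hrem : pvRemFrom ks c = pvAsciiUpper[c] :: pvRemFrom ks (c+1) := by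
          unfold pvRemFrom
          rw [hdropc, List.filter_cons_of_pos (by rw [← hgetD]; simp only [eq_false_of_ne_true hks, Bool.not_false])]
        obtain ⟨c', h1, h2⟩ := ih (c+1) (by omega) (col+1) (acc ++ [pvAsciiUpper.getD c ' '])
        have hLc : L - col = (L - (col+1)) + 1 := by omega
        refine ⟨c', ?_, ?_⟩
        · rw [h1, hrem, hLc, hgetD, List.take_succ_cons]
          simp
        · rw [h2, hrem, hLc, List.drop_succ_cons]
    · rw [pvFillRow, dif_neg hg]
      rcases Nat.lt_or_ge c 26 with hc26 | hc26
      · have hcol : L - col = 0 := by omega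
        exact ⟨c, by rw [hcol]; simp, by rw [hcol]; simp⟩
      · have hrem : pvRemFrom ks c = [] := by
          unfold pvRemFrom
          rw [List.drop_eq_nil_of_le (by rw [pvUpperLen]; omega)]
          rfl
        exact ⟨c, by rw [hrem]; simp, by rw [hrem]; simp⟩

-- A's outer row loop produces consecutive L-chunks of the leftover letters
theorem pvRows_spec (ks : PySem.Set Char) (L : Nat) (r : Nat) :
    ∃ cr, (List.range r).foldl (fun (st : List (List Char) × Nat) _ =>
          (st.1 ++ [(pvFillRow ks L st.2 0 []).1], (pvFillRow ks L st.2 0 []).2)) ([], 0)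
        = ((List.range r).map (fun i => ((pvRemFrom ks 0).drop (i*L)).take L), cr)
      ∧ pvRemFrom ks cr = (pvRemFrom ks 0).drop (r*L) := by
  induction r with
  | zero => exact ⟨0, by simp, by simp⟩
  | succ r ih =>
    obtain ⟨cr, h1, h2⟩ := ih
    rw [List.range_succ, List.foldl_append, h1, List.foldl_cons, List.foldl_nil]
    obtain ⟨c', f1, f2⟩ := pvFillRow_spec ks L 26 cr (by omega) 0 []
    refine ⟨c', ?_, ?_⟩
    · simp only [f1, h2]
      simp
    · rw [f2, h2, List.drop_drop, Nat.succ_mul, Nat.sub_zero]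

theorem pvRangeSplit (a b : Nat) (h : a ≤ b) :
    List.range b = List.range a ++ List.range' a (b - a) := by
  have h2 := List.range'_append (s := 0) (m := a) (n := b - a) (step := 1)
  simp only [Nat.zero_add, Nat.one_mul] at h2
  rw [List.range_eq_range', List.range_eq_range', h2]
  congr 1
  omega

theorem pvFilterMapRangeExt {β : Type} (g : Nat → Option β) (a b : Nat) (hab : a ≤ b)
    (h : ∀ k, a ≤ k → g k = none) :
    (List.range a).filterMap g = (List.range b).filterMap g := by
  rw [pvRangeSplit a b hab, List.filterMap_append,
    List.filterMap_eq_nil_iff.mpr (fun k hk => h k (List.mem_range'_1.mp hk).1), List.append_nil]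

theorem pvFilterMapOfFilter {β : Type} (p : Nat → Bool) (h : Nat → β) (l : List Nat) :
    (l.filter p).map h = l.filterMap (fun i => if p i then some (h i) else none) := by
  induction l with
  | nil => rfl
  | cons x t ih => by_cases hx : p x <;> simp [hx, ih]

theorem pvCeilLe (x L : Nat) (hL : 0 < L) : x ≤ L * ((x + L - 1) / L) := by
  have h2 := Nat.div_add_mod (x + L - 1) L
  have h3 := Nat.mod_lt (x + L - 1) hL
  omega

theorem pvSlicePosLt (rem : List Char) (col L : Nat) (hL : 0 < L) (hcol : col < rem.length) :
    PySem.List.slice? rem (some (col : Int)) none (L : Int)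
      = some ((List.range ((rem.length - col + L - 1) / L)).filterMap (fun k => rem[col + L * k]?)) := by
  unfold PySem.List.slice? PySem.List.sliceIndices
  simp only [show ¬((L:Nat):Int) = 0 by omega, if_false, show ¬((L:Nat):Int) < 0 by omega, if_false,
    show ¬((col:Nat):Int) < 0 by omega, show (0:Int) < (L:Nat) by omega, if_true]
  have hmin : min ((col:Nat):Int) ((rem.length:Nat):Int) = ((col:Nat):Int) := by
    rw [min_eq_left]; omega
  rw [hmin]
  rw [if_pos (by omega : ((col:Nat):Int) < ((rem.length:Nat):Int))]
  have hcast : ((rem.length:Nat):Int) - col + L - 1 = (((rem.length - col + L - 1 : Nat)):Int) := by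
    omega
  rw [hcast, ← Int.natCast_ediv, Int.toNat_natCast]
  congr 1

theorem pvSlicePosGe (rem : List Char) (col L : Nat) (hL : 0 < L) (hcol : rem.length ≤ col) :
    PySem.List.slice? rem (some (col : Int)) none (L : Int) = some [] := by
  unfold PySem.List.slice? PySem.List.sliceIndices
  simp only [show ¬((L:Nat):Int) = 0 by omega, if_false, show ¬((L:Nat):Int) < 0 by omega, if_false,
    show ¬((col:Nat):Int) < 0 by omega, show (0:Int) < (L:Nat) by omega, if_true]
  have hmin : min ((col:Nat):Int) ((rem.length:Nat):Int) = ((rem.length:Nat):Int) := by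
    rw [min_eq_right]; omega
  rw [hmin, if_neg (by omega), List.range_zero, List.filterMap_nil]

-- the column-reading of the chunked table equals the Python slice rem[col::L]
theorem pvChunkCols (L col r : Nat) (hL : 0 < L) (hcol : col < L) (rem : List Char)
    (hlen : rem.length ≤ r * L) :
    (((List.range r).map (fun i => (rem.drop (i*L)).take L)).filter
        (fun row => decide (col < row.length))).map (fun row => row.getD col ' ')
      = (PySem.List.slice? rem (some (col : Int)) none (L : Int)).getD [] := by
  have hLHS : (((List.range r).map (fun i => (rem.drop (i*L)).take L)).filter
        (fun row => decide (col < row.length))).map (fun row => row.getD col ' ')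
      = (List.range r).filterMap (fun k => rem[col + L * k]?) := by
    rw [List.filter_map, List.map_map, pvFilterMapOfFilter]
    apply List.filterMap_congr
    intro i _
    simp only [Function.comp_apply, List.length_take, List.length_drop]
    by_cases hc : col < min L (rem.length - i * L)
    · rw [if_pos (by simpa using hc)]
      have hcr : col < rem.length - i * L := lt_of_lt_of_le hc (min_le_right _ _)
      have hmc : L * i = i * L := Nat.mul_comm L i
      have hin : col + L * i < rem.length := by omega
      have hidx : i * L + col = col + L * i := by rw [Nat.mul_comm i L]; exact Nat.add_comm _ _
      rw [List.getElem?_eq_getElem hin]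
      congr 1
      rw [List.getD_eq_getElem?_getD, List.getElem?_take, if_pos (lt_of_lt_of_le hc (min_le_left _ _)),
        List.getElem?_drop, hidx, List.getElem?_eq_getElem hin, Option.getD_some]
    · rw [if_neg (by simpa using hc)]
      have h5 : min L (rem.length - i * L) ≤ col := Nat.not_lt.mp (by simpa using hc)
      have hmc : L * i = i * L := Nat.mul_comm L i
      rcases Nat.le_total L (rem.length - i * L) with h6 | h6
      · rw [min_eq_left h6] at h5; omega
      · rw [min_eq_right h6] at h5
        rw [List.getElem?_eq_none (by omega)]
  rw [hLHS]
  rcases Nat.lt_or_ge col rem.length with hn | hn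
  · rw [pvSlicePosLt rem col L hL hn, Option.getD_some]
    set cnt := (rem.length - col + L - 1) / L with hcnt
    have hnone : ∀ k, (cnt ≤ k ∨ r ≤ k) → rem[col + L * k]? = none := by
      intro k hk
      apply List.getElem?_eq_none
      rcases hk with hk | hk
      · have h1 := pvCeilLe (rem.length - col) L hL
        have h2 : L * cnt ≤ L * k := Nat.mul_le_mul_left L hk
        have h3 : (rem.length - col + L - 1) / L ≤ cnt := le_of_eq hcnt.symm
        have h4 : L * ((rem.length - col + L - 1) / L) ≤ L * cnt := Nat.mul_le_mul_left L h3
        omega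
      · have h2 : L * r ≤ L * k := Nat.mul_le_mul_left L hk
        have : r * L = L * r := Nat.mul_comm r L
        omega
    rcases le_total r cnt with h | h
    · exact pvFilterMapRangeExt _ r cnt h (fun k hk => hnone k (Or.inr hk))
    · exact (pvFilterMapRangeExt _ cnt r h (fun k hk => hnone k (Or.inl hk))).symm
  · rw [pvSlicePosGe rem col L hL hn, Option.getD_some]
    exact List.filterMap_eq_nil_iff.mpr (fun k _ => List.getElem?_eq_none (by omega))

-- the first-occurrence rank dict agrees with sorted(key).index
theorem pvRanks_spec (xs : List Char) : ∀ (s : Int) (d : PySem.Dict Char Int) (c : Char),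
    ((PySem.List.enumerate xs s).foldl
        (fun d rc => if (d.get? rc.2).isSome then d else d.insert rc.2 rc.1) d).get? c
      = (d.get? c).or ((List.idxOf? c xs).map (fun n : Nat => (n : Int) + s)) := by
  induction xs with
  | nil => intro s d c; simp [PySem.List.enumerate]
  | cons x t ih =>
    intro s d c
    rw [PySem.List.enumerate_cons, List.foldl_cons]
    simp only []
    by_cases hx : (d.get? x).isSome
    · rw [if_pos hx, ih]
      by_cases hxc : x = c
      · subst hxc
        obtain ⟨v, hv⟩ := Option.isSome_iff_exists.mp hx
        simp [hv]
      · have hidx : List.idxOf? c (x :: t) = (List.idxOf? c t).map (· + 1) := by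
          rw [List.idxOf?_cons]; simp [beq_iff_eq, hxc]
        rw [hidx]
        cases hdc : d.get? c with
        | some v => simp
        | none =>
          simp only [Option.none_or, Option.map_map]
          congr 1
          funext n
          simp only [Function.comp_apply]
          push_cast
          ring
    · rw [if_neg hx, ih]
      have hdx : d.get? x = none := Option.not_isSome_iff_eq_none.mp hx
      by_cases hxc : x = c
      · subst hxc
        rw [PySem.Dict.get?_insert_self, hdx]
        have hidx : List.idxOf? x (x :: t) = some 0 := by simp [List.idxOf?_cons]
        simp [hidx]
      · rw [PySem.Dict.get?_insert_of_ne _ _ (fun h => hxc h.symm)]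
        have hidx : List.idxOf? c (x :: t) = (List.idxOf? c t).map (· + 1) := by
          rw [List.idxOf?_cons]; simp [beq_iff_eq, hxc]
        rw [hidx]
        cases hdc : d.get? c with
        | some v => simp
        | none =>
          simp only [Option.none_or, Option.map_map]
          congr 1
          funext n
          simp only [Function.comp_apply]
          push_cast
          ring

-- A's lagged-Fibonacci loop is B's sliding-window generator
theorem pvFullKey_spec (N : Nat) (hN : 2 ≤ N) : ∀ (k : Nat) (fk : List Int), N ≤ fk.length →
    (List.range' fk.length k).foldl
        (fun fk i => fk ++ [PySem.Int.mod (fk.getD (i - N) 0 + fk.getD (i - N + 1) 0) 10]) fk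
      = fk ++ pvWindowGen k (fk.drop (fk.length - N)) := by
  intro k
  induction k with
  | zero => intro fk h; simp [pvWindowGen]
  | succ k ih =>
    intro fk h
    rw [List.range'_succ, List.foldl_cons]
    have hg : ∀ (m : Nat), fk.getD (fk.length - N + m) 0 = (fk.drop (fk.length - N)).getD m 0 := by
      intro m
      simp [List.getD_eq_getElem?_getD, List.getElem?_drop]
    have hnxt : PySem.Int.mod (fk.getD (fk.length - N) 0 + fk.getD (fk.length - N + 1) 0) 10
        = PySem.Int.mod ((fk.drop (fk.length - N)).getD 0 0 + (fk.drop (fk.length - N)).getD 1 0) 10 := by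
      rw [← hg 0, ← hg 1]; norm_num
    set nxt := PySem.Int.mod (fk.getD (fk.length - N) 0 + fk.getD (fk.length - N + 1) 0) 10 with hn
    have h1 := ih (fk ++ [nxt]) (by simp; omega)
    simp only [List.length_append, List.length_cons, List.length_nil, Nat.zero_add] at h1
    have hdrop : (fk ++ [nxt]).drop (fk.length + 1 - N) = fk.drop (fk.length + 1 - N) ++ [nxt] :=
      List.drop_append_of_le_length (by omega)
    have hdd : fk.drop (fk.length + 1 - N) = (fk.drop (fk.length - N)).drop 1 := by
      rw [List.drop_drop]; congr 1; omega
    rw [h1, hdrop, hdd]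
    rw [pvWindowGen]
    simp only [← hnxt, List.append_assoc, List.cons_append, List.nil_append]


-- ===== VERDICT (by name: the statement is the Claim_ definition above) =====
theorem alphabet_and_key_spec : Claim_equal_alphabet_and_key := by
  intro primer key plaintext _ hPre
  obtain ⟨hk, _hint, hlen2⟩ := hPre
  unfold Spec_alphabet_and_key alphabet_and_key alphabet_and_key_alt
  dsimp only
  rw [Prod.mk.injEq]
  refine ⟨?_, ?_⟩
  · -- ciphertext alphabet
    set kl := key.toList with hkldef
    have hL : 0 < kl.length := List.length_pos_iff.mpr hk
    set ks := PySem.Set.ofList kl with hksdef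
    set skl := PySem.List.sorted kl (fun x => x) with hskldef
    set fA := fun ch => (PySem.List.index? skl ch).getD 0 with hfAdef
    set orderA := kl.map fA with horderAdef
    set r := (26 + kl.length - 1) / kl.length - 1 with hrdef
    -- B's rank dict agrees with sorted(key).index
    have hfB : ∀ ch ∈ kl, ((((PySem.List.enumerate skl 0).foldl
        (fun (d : PySem.Dict Char Int) rc => if (d.get? rc.2).isSome then d else d.insert rc.2 rc.1)
        PySem.Dict.empty).get? ch).getD 0) = ((fA ch : Nat) : Int) := by
      intro ch hch
      rw [pvRanks_spec]
      have hempty : (PySem.Dict.empty : PySem.Dict Char Int).get? ch = none := by rfl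
      rw [hempty, Option.none_or, hfAdef]
      have hchs : ch ∈ skl := ((PySem.List.sorted_perm kl (fun x => x) false).mem_iff).mpr hch
      obtain ⟨m, hm⟩ := Option.isSome_iff_exists.mp (List.isSome_idxOf?.mpr hchs)
      simp only [PySem.List.index?]
      rw [hm]
      simp
    have hordermem : ∀ n ∈ orderA, n < kl.length := by
      intro n hn
      obtain ⟨ch, hch, rfl⟩ := List.mem_map.mp hn
      have hchs : ch ∈ skl := ((PySem.List.sorted_perm kl (fun x => x) false).mem_iff).mpr hch
      obtain ⟨m, hm⟩ := Option.isSome_iff_exists.mp (List.isSome_idxOf?.mpr hchs)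
      have hmlt : m < skl.length := (List.idxOf?_eq_some_iff.mp hm).1
      have hlen : skl.length = kl.length := (PySem.List.sorted_perm kl (fun x => x) false).length_eq
      simp only [hfAdef, PySem.List.index?]
      rw [hm]
      simpa [← hlen] using hmlt
    have horderB : kl.map (fun c => ((((PySem.List.enumerate skl 0).foldl
        (fun (d : PySem.Dict Char Int) rc => if (d.get? rc.2).isSome then d else d.insert rc.2 rc.1)
        PySem.Dict.empty).get? c).getD 0)) = orderA.map (fun n : Nat => (n : Int)) := by
      rw [horderAdef, List.map_map]
      exact List.map_congr_left (fun ch hch => hfB ch hch)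
    rw [horderB]
    rw [PySem.List.foldl_append_eq_flatMap]
    obtain ⟨cr, hrows, -⟩ := pvRows_spec ks kl.length r
    rw [hrows]
    dsimp only
    rw [PySem.List.foldl_congr_mem _ _
      (fun acc col => acc ++ (((kl :: (List.range r).map
          (fun i => ((pvRemFrom ks 0).drop (i * kl.length)).take kl.length)).filter
          (fun row => decide (col < row.length))).map
          (fun row => String.singleton (row.getD col ' ')))) _
      (fun acc col _ => PySem.List.foldl_append_ite (fun row : List Char => col < row.length)
        (fun row : List Char => String.singleton (row.getD col ' ')) _ acc)]
    rw [PySem.List.foldl_append_eq_flatMap]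
    simp only [List.nil_append]
    rw [List.flatMap_def, List.flatMap_def, List.map_map, List.map_map]
    rw [← List.flatMap_def, ← List.flatMap_def]
    rw [horderAdef]
    conv_rhs => rw [List.flatMap_def, List.map_map, List.map_map, ← List.flatMap_def]
    apply List.flatMap_congr
    intro ch hch
    simp only [Function.comp_apply]
    set nA := fA ch with hnAdef
    have hnAmem : nA ∈ List.map fA kl := List.mem_map_of_mem hch
    have hnA : nA < kl.length := hordermem _ (by rw [horderAdef]; exact hnAmem)
    have hnA' : nA < (List.map fA kl).length := by simpa using hnA
    have hBidx : (PySem.List.pyGet? (List.map (fun n : Nat => (n : Int)) (List.map fA kl)) (nA : Int)).getD 0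
        = (((List.map fA kl).getD nA 0 : Nat) : Int) := by
      rw [PySem.List.pyGet?_natCast, List.getElem?_map, List.getElem?_eq_getElem hnA',
        List.getD_eq_getElem?_getD, List.getElem?_eq_getElem hnA']
      rfl
    rw [hBidx]
    set col := (List.map fA kl).getD nA 0 with hcoldef
    have hcolmem : col ∈ List.map fA kl := by
      rw [hcoldef, List.getD_eq_getElem?_getD, List.getElem?_eq_getElem hnA']
      exact List.getElem_mem hnA'
    have hcol : col < kl.length := hordermem _ (by rw [horderAdef]; exact hcolmem)
    have hhead : kl.getD col ' ' = (PySem.List.pyGet? kl (col : Int)).getD ' ' := by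
      rw [PySem.List.pyGet?_natCast, List.getD_eq_getElem?_getD]
    rw [List.filter_cons_of_pos (by simpa using hcol), List.map_cons, hhead]
    congr 1
    have hrem0 : pvRemFrom ks 0 = List.filter (fun c => !ks.contains c) pvAsciiUpper := by
      unfold pvRemFrom
      rw [List.drop_zero]
    have hchunks : (List.range r).map (fun i => ((pvRemFrom ks 0).drop (i * kl.length)).take kl.length)
        = (List.range r).map (fun i => (((pvRemFrom ks 0).take (r * kl.length)).drop (i * kl.length)).take kl.length) := by
      apply List.map_congr_left
      intro i hi
      rw [List.drop_take, List.take_take]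
      congr 1
      have hi' := List.mem_range.mp hi
      have hmul : (i + 1) * kl.length ≤ r * kl.length := Nat.mul_le_mul_right _ (by omega)
      rw [Nat.succ_mul] at hmul
      rw [min_eq_left (by omega)]
    have hlen' : ((pvRemFrom ks 0).take (r * kl.length)).length ≤ r * kl.length := by
      rw [List.length_take]
      exact min_le_left _ _
    rw [show (fun row : List Char => String.singleton (row.getD col ' '))
        = (String.singleton ∘ fun row : List Char => row.getD col ' ') from rfl, ← List.map_map]
    rw [hchunks, pvChunkCols kl.length col r hL hcol _ hlen', hrem0]
  · -- full key
    rcases Nat.lt_or_ge primer.length plaintext.toList.length with hplt | hple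
    · have hN2 : 2 ≤ primer.length := by
        rcases hlen2 with h | h
        · exact h
        · omega
      have h := pvFullKey_spec primer.length hN2 (plaintext.toList.length - primer.length)
        (primer.map (fun s => (PySem.Int.ofStr? s).getD 0)) (by rw [List.length_map])
      rw [List.length_map, Nat.sub_self, List.drop_zero] at h
      exact h
    · rw [show plaintext.toList.length - primer.length = 0 by omega]
      simp [pvWindowGen]
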